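-- pv_equiv track=rewrite | github.com/didskfo/Algorithm | 프로그래머스/1/42840. 모의고사/모의고사.py | solution
-- ===== SOURCE A (Python) =====
-- def solution(answers):
--     answer = []
--     p1 = [1, 2, 3, 4, 5]
--     p2 = [2, 1, 2, 3, 2, 4, 2, 5]
--     p3 = [3, 3, 1, 1, 2, 2, 4, 4, 5, 5]
--     s1 = s2 = s3 = 0
--     for i in range(len(answers)):
--         if answers[i] == p1[i%len(p1)]:
--             s1 += 1
--         if answers[i] == p2[i%len(p2)]:
--             s2 += 1
--         if answers[i] == p3[i%len(p3)]:
--             s3 += 1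
--     score = [s1, s2, s3]
--     for i in range(3):
--         if score[i] == max(score):
--             answer.append(i+1)
--     return answer
-- ===== SOURCE B (Python) =====
-- def solution(answers):
--     patterns = [
--         [1, 2, 3, 4, 5],
--         [2, 1, 2, 3, 2, 4, 2, 5],
--         [3, 3, 1, 1, 2, 2, 4, 4, 5, 5],
--     ]
--     # One pass: histogram keyed by (index mod 40, answer); 40 = lcm(5, 8, 10),
--     # so each pattern's score is a sum of 40 table lookups, no rescan of answers.
--     cnt = {}
--     for i, a in enumerate(answers):
--         k = (i % 40, a)
--         cnt[k] = cnt.get(k, 0) + 1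
--     scores = [sum(cnt.get((r, p[r % len(p)]), 0) for r in range(40)) for p in patterns]
--     m = max(scores)
--     return [i + 1 for i in range(3) if scores[i] == m]
-- ===== Notes on version B (the rewrite author's own statement) =====
-- stated objective: alternative
-- what changed: B makes a single pass building a histogram keyed by (index mod 40, answer) -- 40 = lcm of the three pattern periods 5, 8, 10 -- and then computes each pattern's score as a sum of 40 table lookups, instead of A's loop that compares every answer against all three cyclic patterns; the top indices are then selected by comprehension instead of A's append loop.
import Mathlib
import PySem

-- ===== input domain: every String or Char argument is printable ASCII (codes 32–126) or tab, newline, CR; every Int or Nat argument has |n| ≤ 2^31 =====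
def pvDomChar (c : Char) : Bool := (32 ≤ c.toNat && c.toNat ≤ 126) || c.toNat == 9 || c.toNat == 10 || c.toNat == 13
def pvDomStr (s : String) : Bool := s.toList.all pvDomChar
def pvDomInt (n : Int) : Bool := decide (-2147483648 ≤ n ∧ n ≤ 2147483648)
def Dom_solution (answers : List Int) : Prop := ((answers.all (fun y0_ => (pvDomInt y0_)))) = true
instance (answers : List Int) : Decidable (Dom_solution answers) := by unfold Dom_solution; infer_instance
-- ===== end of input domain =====

-- B replaces A's compare-every-answer-against-all-three-patterns loop by one pass building a
-- histogram keyed by (index mod 40, answer) (40 = lcm of the pattern periods 5, 8, 10), then reads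
-- each pattern's score off the table in 40 lookups; an alternative of the same O(n) cost.

-- ===== PORT A =====
def solution (answers : List Int) : List Int :=
  let p1 : List Int := [1, 2, 3, 4, 5]
  let p2 : List Int := [2, 1, 2, 3, 2, 4, 2, 5]
  let p3 : List Int := [3, 3, 1, 1, 2, 2, 4, 4, 5, 5]
  let s : Int × Int × Int :=
    (PySem.List.pyRange 0 (answers.length : Int) 1).foldl
      (fun (s : Int × Int × Int) i =>
        ((if PySem.List.pyGetD answers i 0 = PySem.List.pyGetD p1 (PySem.Int.mod i (p1.length : Int)) 0 then s.1 + 1 else s.1),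
         (if PySem.List.pyGetD answers i 0 = PySem.List.pyGetD p2 (PySem.Int.mod i (p2.length : Int)) 0 then s.2.1 + 1 else s.2.1),
         (if PySem.List.pyGetD answers i 0 = PySem.List.pyGetD p3 (PySem.Int.mod i (p3.length : Int)) 0 then s.2.2 + 1 else s.2.2)))
      (0, 0, 0)
  let score : List Int := [s.1, s.2.1, s.2.2]
  (PySem.List.pyRange 0 3 1).foldl
    (fun acc i =>
      if PySem.List.pyGetD score i 0 = (PySem.List.max? score (fun x => x)).getD 0 then acc ++ [i + 1] else acc)
    []

-- ===== PORT B =====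
def solution_alt (answers : List Int) : List Int :=
  let patterns : List (List Int) :=
    [[1, 2, 3, 4, 5], [2, 1, 2, 3, 2, 4, 2, 5], [3, 3, 1, 1, 2, 2, 4, 4, 5, 5]]
  let cnt : PySem.Dict (Int × Int) Int :=
    (PySem.List.enumerate answers 0).foldl
      (fun d ia => d.modify (PySem.Int.mod ia.1 40, ia.2) 0 (· + 1))
      (PySem.Dict.empty : PySem.Dict (Int × Int) Int)
  let scores : List Int := patterns.map (fun p =>
    ((PySem.List.pyRange 0 40 1).map
        (fun r => cnt.getD (r, PySem.List.pyGetD p (PySem.Int.mod r (p.length : Int)) 0) 0)).sum)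
  let m : Int := PySem.List.maxD scores (fun x => x) 0
  ((PySem.List.pyRange 0 3 1).filter (fun i => PySem.List.pyGetD scores i 0 == m)).map (fun i => i + 1)

-- ===== PRECONDITION & SPEC =====
def Spec_solution (answers : List Int) (out : List Int) : Prop := out = solution_alt answers
instance (answers : List Int) (out : List Int) : Decidable (Spec_solution answers out) := by unfold Spec_solution; infer_instance

-- ===== CLAIM (what is proved, stated in full; the proofs are below) =====
def Claim_equal_solution : Prop := ∀ (answers : List Int), Dom_solution answers → Spec_solution answers (solution answers)

-- ===== LEMMAS AND PROOFS =====

-- If k.1 occurs exactly once in rs, the 0/1 indicator sum over rs collapses to one test.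
lemma sum_indicator_single (rs : List Int) (g : Int → Int) (k : Int × Int)
    (hnd : rs.Nodup) (hk : k.1 ∈ rs) :
    (rs.map (fun r => if (r, g r) = k then (1 : Int) else 0)).sum
      = if k.2 = g k.1 then 1 else 0 := by
  induction rs with
  | nil => cases hk
  | cons r rs ih =>
    obtain ⟨hr, hnd'⟩ := List.nodup_cons.1 hnd
    simp only [List.map_cons, List.sum_cons]
    rcases List.mem_cons.1 hk with h | h
    · have hz : (rs.map (fun r' => if (r', g r') = k then (1 : Int) else 0)).sum = 0 := by
        apply List.sum_eq_zero
        intro x hx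
        rcases List.mem_map.1 hx with ⟨r', hr', rfl⟩
        have hne : (r', g r') ≠ k := by
          intro he
          apply hr
          have hr2 : r' = r := (show r' = k.1 from congrArg Prod.fst he).trans h
          exact hr2 ▸ hr'
        simp [hne]
      rw [hz, add_zero]
      obtain ⟨k1, k2⟩ := k
      simp only at h
      subst h
      simp [Prod.ext_iff, eq_comm]
    · have hne : (r, g r) ≠ k := by
        intro he
        apply hr
        rw [show r = k.1 from congrArg Prod.fst he]
        exact h
      rw [ih hnd' h]
      simp [hne]

-- Summing per-key counts over a duplicate-free key range equals one filtered count.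
lemma sum_counts (rs : List Int) (hnd : rs.Nodup) (g : Int → Int) :
    ∀ (ks : List (Int × Int)), (∀ k ∈ ks, k.1 ∈ rs) →
      (rs.map (fun r => (ks.count (r, g r) : Int))).sum
        = (ks.countP (fun k => decide (k.2 = g k.1)) : Int) := by
  intro ks
  induction ks with
  | nil => intro _; simp
  | cons k ks ih =>
    intro hmem
    have h1 : ∀ r : Int, ((k :: ks).count (r, g r) : Int)
        = (ks.count (r, g r) : Int) + (if (r, g r) = k then (1 : Int) else 0) := by
      intro r
      rw [List.count_cons]
      push_cast
      by_cases hxk : (r, g r) = k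
      · simp [hxk]
      · simp [hxk, Ne.symm hxk]
    have h2 : (rs.map (fun r => ((k :: ks).count (r, g r) : Int))).sum
        = (rs.map (fun r => (ks.count (r, g r) : Int))).sum
          + (rs.map (fun r => if (r, g r) = k then (1 : Int) else 0)).sum := by
      rw [← PySem.List.sum_map_add_int]
      exact congrArg List.sum (List.map_congr_left (fun r _ => h1 r))
    rw [h2, ih (fun x hx => hmem x (List.mem_cons_of_mem _ hx)),
        sum_indicator_single rs g k hnd (hmem k (List.mem_cons_self ..)),
        List.countP_cons]
    push_cast
    by_cases hk : k.2 = g k.1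
    · simp [hk]
    · simp [hk]

-- B's 40-lookup table read equals A's one-accumulator scan for any pattern whose length divides 40.
lemma score_eq (answers p : List Int) (hL : 0 < (p.length : Int)) (hd : (p.length : Int) ∣ 40) :
    ((PySem.List.pyRange 0 40 1).map
        (fun r => ((PySem.List.enumerate answers 0).foldl
            (fun d ia => d.modify (PySem.Int.mod ia.1 40, ia.2) 0 (· + 1))
            (PySem.Dict.empty : PySem.Dict (Int × Int) Int)).getD
          (r, PySem.List.pyGetD p (PySem.Int.mod r (p.length : Int)) 0) 0)).sum
      = (PySem.List.pyRange 0 (answers.length : Int) 1).foldl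
          (fun (s : Int) i =>
            if PySem.List.pyGetD answers i 0
                = PySem.List.pyGetD p (PySem.Int.mod i (p.length : Int)) 0 then s + 1 else s) 0 := by
  have hcnt : ∀ k : Int × Int,
      ((PySem.List.enumerate answers 0).foldl
          (fun d ia => d.modify (PySem.Int.mod ia.1 40, ia.2) 0 (· + 1))
          (PySem.Dict.empty : PySem.Dict (Int × Int) Int)).getD k 0
        = (((PySem.List.enumerate answers 0).map (fun ia => (PySem.Int.mod ia.1 40, ia.2))).count k : Int) := by
    intro k
    have hfold : (PySem.List.enumerate answers 0).foldl
        (fun d ia => d.modify (PySem.Int.mod ia.1 40, ia.2) 0 (· + 1))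
        (PySem.Dict.empty : PySem.Dict (Int × Int) Int)
        = ((PySem.List.enumerate answers 0).map (fun ia => (PySem.Int.mod ia.1 40, ia.2))).foldl
            (fun d x => PySem.Dict.modify d x 0 (· + 1))
            (PySem.Dict.empty : PySem.Dict (Int × Int) Int) := by
      rw [List.foldl_map]
    rw [hfold, PySem.Dict.getD_foldl_modify_add_one]
    simp
  rw [List.map_congr_left
        (fun r _ => hcnt (r, PySem.List.pyGetD p (PySem.Int.mod r (p.length : Int)) 0))]
  have hmem : ∀ k ∈ (PySem.List.enumerate answers 0).map
      (fun ia => (PySem.Int.mod ia.1 40, ia.2)), k.1 ∈ PySem.List.pyRange 0 40 1 := by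
    intro k hk
    rcases List.mem_map.1 hk with ⟨ia, _, rfl⟩
    rw [PySem.List.mem_pyRange_one]
    exact ⟨PySem.Int.mod_nonneg _ (by norm_num), PySem.Int.mod_lt _ (by norm_num)⟩
  rw [sum_counts _ (PySem.List.nodup_pyRange_one 0 40)
        (fun r => PySem.List.pyGetD p (PySem.Int.mod r (p.length : Int)) 0) _ hmem]
  have hk2 : ((PySem.List.enumerate answers 0).map
        (fun ia => (PySem.Int.mod ia.1 40, ia.2))).countP
        (fun k => decide (k.2 = PySem.List.pyGetD p (PySem.Int.mod k.1 (p.length : Int)) 0))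
      = (PySem.List.enumerate answers 0).countP
          (fun ia => decide (ia.2 = PySem.List.pyGetD p (PySem.Int.mod ia.1 (p.length : Int)) 0)) := by
    rw [List.countP_map]
    apply List.countP_congr
    intro ia hia
    rcases (PySem.List.mem_enumerate_iff _ _ _).1 hia with ⟨j, hj, rfl⟩
    have hmm : PySem.Int.mod (PySem.Int.mod ((0 : Int) + (j : Int)) 40) (p.length : Int)
        = PySem.Int.mod ((0 : Int) + (j : Int)) (p.length : Int) := by
      rw [PySem.Int.mod_eq_emod_of_pos (by norm_num : (0:Int) < 40),
          PySem.Int.mod_eq_emod_of_pos hL, PySem.Int.mod_eq_emod_of_pos hL]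
      exact Int.emod_emod_of_dvd _ hd
    dsimp only [Function.comp]
    rw [hmm]
  rw [hk2]
  have hright := PySem.List.foldl_ite_add_one
    (p := fun i : Int => PySem.List.pyGetD answers i 0
        = PySem.List.pyGetD p (PySem.Int.mod i (p.length : Int)) 0)
    (l := PySem.List.pyRange 0 (answers.length : Int) 1) (a := (0 : Int))
  rw [hright, PySem.List.enumerate_eq_map_pyRange (d := 0), List.countP_map]
  rw [zero_add]
  exact congrArg _ (List.countP_congr (fun x _ => Iff.rfl))

-- The combined three-accumulator loop is three independent loops.
lemma foldl_triple {a : Type} (l : List a) (f g h : Int → a → Int) (x y z : Int) :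
    l.foldl (fun s e => (f s.1 e, g s.2.1 e, h s.2.2 e)) (x, y, z)
      = (l.foldl f x, l.foldl g y, l.foldl h z) := by
  induction l generalizing x y z with
  | nil => rfl
  | cons e t ih => simpa using ih (f x e) (g y e) (h z e)

-- ===== VERDICT (by name: the statement is the Claim_ definition above) =====
theorem solution_spec : Claim_equal_solution := by
  intro answers _
  unfold Spec_solution solution solution_alt
  dsimp only
  rw [foldl_triple (PySem.List.pyRange 0 (answers.length : Int) 1)
        (fun (s : Int) i => if PySem.List.pyGetD answers i 0 = PySem.List.pyGetD ([1,2,3,4,5] : List Int) (PySem.Int.mod i (([1,2,3,4,5] : List Int).length : Int)) 0 then s + 1 else s)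
        (fun (s : Int) i => if PySem.List.pyGetD answers i 0 = PySem.List.pyGetD ([2,1,2,3,2,4,2,5] : List Int) (PySem.Int.mod i (([2,1,2,3,2,4,2,5] : List Int).length : Int)) 0 then s + 1 else s)
        (fun (s : Int) i => if PySem.List.pyGetD answers i 0 = PySem.List.pyGetD ([3,3,1,1,2,2,4,4,5,5] : List Int) (PySem.Int.mod i (([3,3,1,1,2,2,4,4,5,5] : List Int).length : Int)) 0 then s + 1 else s)]
  simp only [List.map_cons, List.map_nil]
  rw [← score_eq answers [1,2,3,4,5] (by norm_num) (by norm_num),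
      ← score_eq answers [2,1,2,3,2,4,2,5] (by norm_num) (by norm_num),
      ← score_eq answers [3,3,1,1,2,2,4,4,5,5] (by norm_num) (by norm_num)]
  rw [PySem.List.foldl_append_ite
        (p := fun i : Int => PySem.List.pyGetD _ i 0 = (PySem.List.max? _ (fun x => x)).getD 0)
        (f := fun i : Int => i + 1)]
  rw [List.nil_append]
  apply congrArg
  apply List.filter_congr
  intro i _
  rfl
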